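-- pv_equiv track=rewrite | github.com/LunaLii/PR301-Assignment-1 | fileHandler.py | class_handler
-- ===== SOURCE A (Python) =====
-- def class_handler(file):
--     classList = [[]]
--     for i, m in enumerate(file[1:-1]): #file[1:-1] removes the first and last elements of the file
--         if m == "\n":
--             if i != len(file[1:-1]) - 1:
--                 classList.append([])
--         else:
--             classList[-1].append(m)
--     return classList
-- ===== SOURCE B (Python) =====
-- def class_handler(file):
--     content = file[1:-1]
--     cuts = [i for i, m in enumerate(content) if m == "\n"]
--     bounds = [-1] + cuts + [len(content)]
--     groups = [content[a + 1:b] for a, b in zip(bounds, bounds[1:])]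
--     if content and content[-1] == "\n":
--         groups.pop()
--     return groups
-- ===== Notes on version B (the rewrite author's own statement) =====
-- stated objective: alternative
-- what changed: B replaces A's single accumulator loop (append-to-last-group with an index guard) by an index scan that collects the positions of the "\n" delimiters and slices the content between consecutive boundaries, dropping the final empty group when the content ends with a delimiter.
import Mathlib
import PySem

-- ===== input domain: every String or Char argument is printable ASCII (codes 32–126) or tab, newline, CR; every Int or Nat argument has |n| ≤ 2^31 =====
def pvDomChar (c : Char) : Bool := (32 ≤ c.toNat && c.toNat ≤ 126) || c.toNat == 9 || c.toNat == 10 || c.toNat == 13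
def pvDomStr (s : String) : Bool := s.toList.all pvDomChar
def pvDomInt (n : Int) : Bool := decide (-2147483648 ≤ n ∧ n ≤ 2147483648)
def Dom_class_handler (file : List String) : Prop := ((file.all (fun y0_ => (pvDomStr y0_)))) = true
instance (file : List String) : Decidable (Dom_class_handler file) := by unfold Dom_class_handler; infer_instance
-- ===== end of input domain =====

-- B rebuilds the groups from the positions of the "\n" delimiters by slicing between consecutive
-- boundaries instead of A's single accumulator loop; objective: alternative decomposition, same cost.

-- ===== PORT A =====
-- classList[-1].append(m): append m to the last group (classList is always nonempty in A)
def pvAppendLast : List (List String) → String → List (List String)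
  | [], _ => []
  | [l], m => [l ++ [m]]
  | h :: t, m => h :: pvAppendLast t m

def class_handler (file : List String) : List (List String) :=
  (PySem.List.enumerate (PySem.List.slice file (some 1) (some (-1)))).foldl
    (fun classList im =>
      if im.2 = "\n" then
        if im.1 ≠ ((PySem.List.slice file (some 1) (some (-1))).length : Int) - 1 then
          classList ++ [[]]
        else classList
      else pvAppendLast classList im.2)
    [[]]

-- ===== PORT B =====
def class_handler_alt (file : List String) : List (List String) :=
  let content := PySem.List.slice file (some 1) (some (-1))
  let cuts := ((PySem.List.enumerate content).filter (fun im => im.2 == "\n")).map (·.1)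
  let bounds := -1 :: (cuts ++ [(content.length : Int)])
  let groups := (bounds.zip bounds.tail).map
    (fun ab => PySem.List.slice content (some (ab.1 + 1)) (some ab.2))
  if content ≠ [] ∧ PySem.List.pyGet? content (-1) = some "\n" then groups.dropLast else groups

-- ===== PRECONDITION & SPEC =====
def Spec_class_handler (file : List String) (out : List (List String)) : Prop := out = class_handler_alt file
instance (file : List String) (out : List (List String)) : Decidable (Spec_class_handler file out) := by unfold Spec_class_handler; infer_instance

-- ===== CLAIM (what is proved, stated in full; the proofs are below) =====
def Claim_equal_class_handler : Prop := ∀ (file : List String), Dom_class_handler file → Spec_class_handler file (class_handler file)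

-- ===== LEMMAS AND PROOFS =====

-- reference: plain split of a list on "\n" (always nonempty)
def pvConsHead (x : String) : List (List String) → List (List String)
  | [] => [[x]]
  | h :: r => (x :: h) :: r

def pvSplit : List String → List (List String)
  | [] => [[]]
  | x :: t => if x = "\n" then [] :: pvSplit t else pvConsHead x (pvSplit t)

theorem pvSplit_ne_nil (l : List String) : pvSplit l ≠ [] := by
  induction l with
  | nil => simp [pvSplit]
  | cons x t ih =>
    simp only [pvSplit]
    split
    · simp
    · cases h : pvSplit t with
      | nil => exact absurd h ih
      | cons a r => simp [pvConsHead]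

theorem pvSplit_headD_tail (l : List String) :
    (pvSplit l).headD [] :: (pvSplit l).tail = pvSplit l := by
  cases h : pvSplit l with
  | nil => exact absurd h (pvSplit_ne_nil l)
  | cons a r => simp

-- A's loop body with the index guard stripped (the guard only fires on the last element)
def pvStep (acc : List (List String)) (m : String) : List (List String) :=
  if m = "\n" then acc ++ [[]] else pvAppendLast acc m

theorem pvAppendLast_append (P : List (List String)) (l : List String) (m : String) :
    pvAppendLast (P ++ [l]) m = P ++ [l ++ [m]] := by
  induction P with
  | nil => simp [pvAppendLast]
  | cons h t ih =>
    cases t with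
    | nil => simp [pvAppendLast]
    | cons u v =>
      have h1 : pvAppendLast ((h :: u :: v) ++ [l]) m
          = h :: pvAppendLast ((u :: v) ++ [l]) m := rfl
      rw [h1, ih]
      simp

theorem foldl_pvStep (t : List String) : ∀ (P : List (List String)) (l : List String),
    List.foldl pvStep (P ++ [l]) t = P ++ (l ++ (pvSplit t).headD []) :: (pvSplit t).tail := by
  induction t with
  | nil => intro P l; simp [pvSplit]
  | cons x r ih =>
    intro P l
    by_cases hx : x = "\n"
    · subst hx
      rw [List.foldl_cons,
        show pvStep (P ++ [l]) "\n" = (P ++ [l]) ++ [[]] from by simp [pvStep],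
        ih (P ++ [l]) []]
      simp only [List.nil_append, List.append_assoc]
      rw [pvSplit_headD_tail]
      simp [pvSplit]
    · simp only [List.foldl_cons, pvStep, if_neg hx, pvAppendLast_append]
      rw [ih P (l ++ [x])]
      cases hr : pvSplit r with
      | nil => exact absurd hr (pvSplit_ne_nil r)
      | cons a s => simp [pvSplit, if_neg hx, hr, pvConsHead]

theorem foldl_pvStep_split (t : List String) :
    List.foldl pvStep [[]] t = pvSplit t := by
  have h := foldl_pvStep t [] []
  simp only [List.nil_append] at h
  rw [h]
  exact pvSplit_headD_tail t

theorem pvSplit_concat_nl (ys : List String) :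
    pvSplit (ys ++ ["\n"]) = pvSplit ys ++ [[]] := by
  induction ys with
  | nil => simp [pvSplit]
  | cons x t ih =>
    by_cases hx : x = "\n"
    · subst hx; simp [pvSplit, ih]
    · simp only [List.cons_append, pvSplit, if_neg hx, ih]
      cases hr : pvSplit t with
      | nil => exact absurd hr (pvSplit_ne_nil t)
      | cons a s => simp [pvConsHead]

theorem pvSplit_concat (ys : List String) (y : String) (hy : y ≠ "\n") :
    pvSplit (ys ++ [y]) = pvAppendLast (pvSplit ys) y := by
  induction ys with
  | nil => simp [pvSplit, if_neg hy, pvConsHead, pvAppendLast]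
  | cons x t ih =>
    by_cases hx : x = "\n"
    · subst hx
      simp only [List.cons_append, pvSplit, reduceIte, ih]
      cases hr : pvSplit t with
      | nil => exact absurd hr (pvSplit_ne_nil t)
      | cons a s => cases s <;> simp [pvAppendLast]
    · simp only [List.cons_append, pvSplit, if_neg hx, ih]
      cases hr : pvSplit t with
      | nil => exact absurd hr (pvSplit_ne_nil t)
      | cons a s => cases s <;> simp [pvConsHead, pvAppendLast]

-- ===== A side: eliminating the index guard =====
def pvStepA (n : Int) (acc : List (List String)) (im : Int × String) : List (List String) :=
  if im.2 = "\n" then (if im.1 ≠ n - 1 then acc ++ [[]] else acc) else pvAppendLast acc im.2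

theorem enumerate_append (xs ys : List String) (s : Int) :
    PySem.List.enumerate (xs ++ ys) s
      = PySem.List.enumerate xs s ++ PySem.List.enumerate ys (s + xs.length) := by
  induction xs generalizing s with
  | nil => simp [PySem.List.enumerate_nil]
  | cons x t ih =>
    simp [PySem.List.enumerate_cons, ih (s + 1)]
    ring_nf

theorem foldl_pvStepA_no_guard (n : Int) (ys : List String) :
    ∀ (s : Int) (acc : List (List String)), s + ys.length ≤ n - 1 →
    List.foldl (pvStepA n) acc (PySem.List.enumerate ys s) = List.foldl pvStep acc ys := by
  induction ys with
  | nil => intro s acc _; simp [PySem.List.enumerate_nil]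
  | cons y t ih =>
    intro s acc h
    simp only [PySem.List.enumerate_cons, List.foldl_cons]
    simp only [List.length_cons] at h
    have hs : s ≠ n - 1 := by push_cast at h; omega
    have hstep : pvStepA n acc (s, y) = pvStep acc y := by
      simp [pvStepA, pvStep, hs]
    rw [hstep]
    exact ih (s + 1) _ (by push_cast at h ⊢; omega)

theorem class_handler_eq_split (file : List String) :
    class_handler file =
      (if (PySem.List.slice file (some 1) (some (-1))).getLast? = some "\n" then
        pvSplit (PySem.List.slice file (some 1) (some (-1))).dropLast
       else pvSplit (PySem.List.slice file (some 1) (some (-1)))) := by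
  unfold class_handler
  set l := PySem.List.slice file (some 1) (some (-1)) with hl
  clear_value l
  have hfold : (fun (classList : List (List String)) (im : Int × String) =>
      if im.2 = "\n" then
        if im.1 ≠ ((l.length : Int)) - 1 then classList ++ [[]] else classList
      else pvAppendLast classList im.2) = pvStepA (l.length : Int) := rfl
  rw [hfold]
  rcases List.eq_nil_or_concat l with h | ⟨ys, y, h⟩
  · subst h; simp [PySem.List.enumerate_nil, pvSplit]
  · rw [List.concat_eq_append] at h
    subst h
    rw [enumerate_append, List.foldl_append]
    rw [foldl_pvStepA_no_guard _ ys 0 [[]] (by simp)]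
    rw [foldl_pvStep_split]
    have hlast : (ys ++ [y]).getLast? = some y := by simp
    have hidx : (0 : Int) + (ys.length : Int) = ((ys ++ [y]).length : Int) - 1 := by
      have h1 : (ys ++ [y]).length = ys.length + 1 := by simp
      rw [h1]; push_cast; ring
    by_cases hy : y = "\n"
    · subst hy
      simp [PySem.List.enumerate_nil, pvStepA, hidx, hlast]
    · simp [PySem.List.enumerate_nil, pvStepA, hy, hlast, pvSplit_concat ys y hy]

-- ===== B side: the slice decomposition equals pvSplit =====
def pvCuts (l : List String) (s : Int) : List Int :=
  ((PySem.List.enumerate l s).filter (fun im => im.2 == "\n")).map (·.1)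

theorem pvCuts_shift (l : List String) (s : Int) :
    pvCuts l (s + 1) = (pvCuts l s).map (· + 1) := by
  induction l generalizing s with
  | nil => simp [pvCuts, PySem.List.enumerate_nil]
  | cons x t ih =>
    simp only [pvCuts, PySem.List.enumerate_cons, List.filter_cons] at *
    by_cases hx : x = "\n" <;> simp [hx, ih]

theorem pvCuts_nonneg (l : List String) : ∀ (s : Int), 0 ≤ s →
    ∀ a ∈ pvCuts l s, 0 ≤ a := by
  induction l with
  | nil => simp [pvCuts, PySem.List.enumerate_nil]
  | cons x t ih =>
    intro s hs a ha
    simp only [pvCuts, PySem.List.enumerate_cons, List.filter_cons] at ha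
    by_cases hx : x = "\n"
    · simp [hx] at ha
      rcases ha with h | h
      · omega
      · exact ih (s + 1) (by omega) a (by simpa [pvCuts] using h)
    · simp [hx] at ha
      exact ih (s + 1) (by omega) a (by simpa [pvCuts] using ha)

-- groups cut out of l by consecutive boundary pairs
def pvGm (l : List String) (B : List Int) : List (List String) :=
  (B.zip B.tail).map (fun ab => PySem.List.slice l (some (ab.1 + 1)) (some ab.2))

theorem slice_cons_shift (x : String) (t : List String) (a b : Int)
    (ha : 0 ≤ a) (hb : 0 ≤ b) :
    PySem.List.slice (x :: t) (some (a + 1)) (some (b + 1)) =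
      PySem.List.slice t (some a) (some b) := by
  rw [PySem.List.slice_toNat _ (by omega) (by omega), PySem.List.slice_toNat _ ha hb]
  have h1 : (a + 1).toNat = a.toNat + 1 := by omega
  have h2 : (b + 1).toNat = b.toNat + 1 := by omega
  simp [h1, h2]

theorem pvGm_shift (x : String) (t : List String) (B : List Int)
    (hB : ∀ a ∈ B, -1 ≤ a) (hBt : ∀ b ∈ B.tail, 0 ≤ b) :
    pvGm (x :: t) (B.map (· + 1)) = pvGm t B := by
  unfold pvGm
  have hmt : (B.map (· + 1)).tail = B.tail.map (· + 1) := by cases B <;> simp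
  rw [hmt, List.zip_map, List.map_map]
  apply List.map_congr_left
  intro ab hab
  have h1 : ab.1 ∈ B := (List.of_mem_zip hab).1
  have h2 : ab.2 ∈ B.tail := (List.of_mem_zip hab).2
  simp only [Function.comp, Prod.map]
  exact slice_cons_shift x t (ab.1 + 1) ab.2 (by have := hB _ h1; omega) (hBt _ h2)

theorem pvGm_cons (l : List String) (b0 b1 : Int) (rest : List Int) :
    pvGm l (b0 :: b1 :: rest) =
      PySem.List.slice l (some (b0 + 1)) (some b1) :: pvGm l (b1 :: rest) := by
  simp [pvGm, List.zip_cons_cons]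

theorem pvGroups_eq_split (l : List String) :
    pvGm l (-1 :: (pvCuts l 0 ++ [(l.length : Int)])) = pvSplit l := by
  induction l with
  | nil =>
    simp [pvGm, pvCuts, PySem.List.enumerate_nil, pvSplit,
      PySem.List.slice_toNat ([] : List String) (le_refl (0:Int)) (le_refl (0:Int))]
  | cons x t ih =>
    have hcuts : pvCuts (x :: t) 0 =
        (if x = "\n" then (0 : Int) :: (pvCuts t 0).map (· + 1) else (pvCuts t 0).map (· + 1)) := by
      simp only [pvCuts, PySem.List.enumerate_cons, List.filter_cons]
      have := pvCuts_shift t 0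
      by_cases hx : x = "\n" <;>
        simp only [hx, beq_iff_eq, reduceIte, List.map_cons] <;>
        simp [pvCuts] at this ⊢ <;> simp [this]
    set R : List Int := pvCuts t 0 ++ [(t.length : Int)] with hR
    have hRnn : ∀ a ∈ R, 0 ≤ a := by
      intro a ha
      rcases List.mem_append.mp ha with h | h
      · exact pvCuts_nonneg t 0 le_rfl a h
      · simp at h; subst h; positivity
    obtain ⟨r0, rt, hRcons⟩ : ∃ r0 rt, R = r0 :: rt := by
      cases hc : pvCuts t 0 with
      | nil => exact ⟨(t.length : Int), [], by simp [hR, hc]⟩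
      | cons a s => exact ⟨a, s ++ [(t.length : Int)], by simp [hR, hc]⟩
    have hr0 : 0 ≤ r0 := hRnn r0 (by rw [hRcons]; simp)
    have hlen : ((x :: t).length : Int) = (t.length : Int) + 1 := by push_cast [List.length_cons]; ring
    have hshift : pvGm (x :: t) (R.map (· + 1)) = pvGm t R := by
      apply pvGm_shift
      · intro a ha; have := hRnn a ha; omega
      · intro b hb; exact hRnn b (List.mem_of_mem_tail hb)
    -- the groups of t, decomposed
    have htdec : pvGm t (-1 :: R) =
        PySem.List.slice t (some (0:Int)) (some r0) :: pvGm t R := by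
      rw [hRcons, pvGm_cons, show ((-1:Int) + 1) = 0 from rfl]
    by_cases hx : x = "\n"
    · subst hx
      have hb : (-1 : Int) :: (pvCuts ("\n" :: t) 0 ++ [(("\n" :: t).length : Int)]) =
          -1 :: ((-1 :: R) |>.map (· + 1)) := by
        simp [hcuts, hR]
      rw [hb]
      have hshift2 : pvGm ("\n" :: t) ((-1 :: R).map (· + 1)) = pvGm t (-1 :: R) := by
        apply pvGm_shift
        · intro a ha
          rcases List.mem_cons.mp ha with h | h
          · omega
          · have := hRnn a h; omega
        · intro b hb'; simp at hb'; exact hRnn b hb'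
      have h00 : PySem.List.slice ("\n" :: t) (some ((-1:Int) + 1)) (some ((-1:Int) + 1)) = [] := by
        rw [show ((-1:Int) + 1) = 0 from rfl, PySem.List.slice_toNat _ le_rfl le_rfl]; simp
      rw [show ((-1:Int) :: R).map (· + 1) = ((-1:Int)+1) :: R.map (· + 1) from by simp,
          pvGm_cons, ← show ((-1:Int) :: R).map (· + 1) = ((-1:Int)+1) :: R.map (· + 1) from by simp,
          hshift2, ih, h00, pvSplit, if_pos rfl]
    · have hb : (-1 : Int) :: (pvCuts (x :: t) 0 ++ [((x :: t).length : Int)]) =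
          -1 :: (R.map (· + 1)) := by
        simp [hcuts, hx, hR]
      have hmapR : R.map (· + 1) = (r0 + 1) :: rt.map (· + 1) := by rw [hRcons]; simp
      have hfirst : PySem.List.slice (x :: t) (some ((-1:Int) + 1)) (some (r0 + 1)) =
          x :: PySem.List.slice t (some (0:Int)) (some r0) := by
        rw [show ((-1:Int) + 1) = 0 from rfl,
            PySem.List.slice_toNat _ le_rfl (by omega), PySem.List.slice_toNat _ le_rfl hr0]
        have h1 : (r0 + 1).toNat = r0.toNat + 1 := by omega
        simp [h1]
      rw [hb, hmapR, pvGm_cons, ← hmapR, hshift, hfirst]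
      rw [pvSplit, if_neg hx, ← ih, htdec, pvConsHead]

theorem pvAlt_eq (file : List String) :
    class_handler_alt file =
      (if (PySem.List.slice file (some 1) (some (-1))).getLast? = some "\n" then
        pvSplit (PySem.List.slice file (some 1) (some (-1))).dropLast
       else pvSplit (PySem.List.slice file (some 1) (some (-1)))) := by
  unfold class_handler_alt
  set l := PySem.List.slice file (some 1) (some (-1)) with hl
  clear_value l
  show (if l ≠ [] ∧ PySem.List.pyGet? l (-1) = some "\n" then
          (pvGm l (-1 :: (pvCuts l 0 ++ [(l.length : Int)]))).dropLast
        else pvGm l (-1 :: (pvCuts l 0 ++ [(l.length : Int)]))) = _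
  rw [pvGroups_eq_split l, PySem.List.pyGet?_neg_one]
  by_cases h : l.getLast? = some "\n"
  · have hne : l ≠ [] := by intro he; subst he; simp at h
    rw [if_pos ⟨hne, h⟩, if_pos h]
    rcases List.eq_nil_or_concat l with he | ⟨ys, y, he⟩
    · exact absurd he hne
    · rw [List.concat_eq_append] at he
      subst he
      have hy : y = "\n" := by simpa using h
      subst hy
      rw [pvSplit_concat_nl ys]
      simp
  · rw [if_neg (by tauto), if_neg h]

-- ===== VERDICT (by name: the statement is the Claim_ definition above) =====
theorem class_handler_spec : Claim_equal_class_handler := by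
  intro file _
  unfold Spec_class_handler
  rw [class_handler_eq_split, pvAlt_eq]
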